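-- pv_equiv track=rewrite | github.com/pypi-data/pypi-mirror-5 | packages/pyrewriter/pyrewriter-0.1.58.zip/pyrewriter-0.1.58/pyrewriter/token.py | _quotedStrClosed
-- ===== SOURCE A (Python) =====
-- def _quotedStrClosed( s_txt ):
--   sOpenQuote = None
--   for i in range( len( s_txt ) ):
--     s = s_txt[ i ]
--     if s in [ "'", '"' ]:
--       ##  This quote starts quoted string?
--       if not sOpenQuote:
--         sOpenQuote = s
--       else:
--         ##  This is not verbatim quote?
--         if i > 0 and '\\' != s_txt[ i - 1 ]:
--           ##  This is same quote that opens string?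
--           if sOpenQuote == s:
--             sOpenQuote = None
--   return sOpenQuote is None
-- ===== SOURCE B (Python) =====
-- def _quotedStrClosed(s_txt):
--   n = len(s_txt)
--   i = 0
--   while i < n:
--     c = s_txt[i]
--     if c in ("'", '"'):
--       # inner scan for matching unescaped closing quote of the same type
--       j = i + 1
--       while j < n:
--         if s_txt[j] == c and s_txt[j - 1] != '\\':
--           break
--         j += 1
--       if j >= n:
--         return False
--       i = j + 1
--     else:
--       i += 1
--   return True
-- ===== Notes on version B (the rewrite author's own statement) =====
-- stated objective: alternative
-- what changed: Replaced A's single pass carrying an open-quote flag by an explicit-index outer while-loop that, on seeing a quote, runs a nested inner while-loop scanning forward for the matching unescaped closing quote (early return False if it runs off the end).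
import Mathlib
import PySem

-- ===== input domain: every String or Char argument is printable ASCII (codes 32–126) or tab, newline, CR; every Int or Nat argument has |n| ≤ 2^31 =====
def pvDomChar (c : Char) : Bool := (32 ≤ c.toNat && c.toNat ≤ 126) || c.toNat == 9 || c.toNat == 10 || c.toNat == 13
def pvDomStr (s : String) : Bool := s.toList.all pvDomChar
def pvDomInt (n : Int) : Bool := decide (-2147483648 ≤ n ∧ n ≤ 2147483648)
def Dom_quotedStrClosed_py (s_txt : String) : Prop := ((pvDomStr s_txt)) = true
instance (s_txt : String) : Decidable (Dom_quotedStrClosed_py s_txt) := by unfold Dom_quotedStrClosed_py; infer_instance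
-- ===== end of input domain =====

-- B replaces A's single pass with a quote-state flag by an explicit-index outer scan with a
-- nested inner scan for the matching closing quote (alternative decomposition, same cost).

-- ===== PORT A =====
-- loop body of A's for-loop (state = sOpenQuote)
def stepA (s_txt : String) (st : Option Char) (i : Int) : Option Char :=
  match PySem.Str.pyGet? s_txt i with
  | none => st   -- unreachable: i ∈ range(len(s_txt))
  | some s =>
    if s = '\'' ∨ s = '"' then
      match st with
      | none => some s
      | some q =>
        if i > 0 ∧ PySem.Str.pyGet? s_txt (i - 1) ≠ some '\\' then
          (if q = s then none else some q)
        else some q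
    else st

def quotedStrClosed_py (s_txt : String) : Bool :=
  ((PySem.List.pyRange 0 (PySem.Str.len s_txt) 1).foldl (stepA s_txt) none).isNone

-- ===== PORT B =====
-- outer while-loop: advance until a quote opens a string; inner while-loop: scan for the
-- matching unescaped closing quote of the same type (break → back to the outer loop).
mutual
def qscOuter (l : List Char) (i : Nat) : Bool :=
  if h : i < l.length then
    if l[i] = '\'' ∨ l[i] = '"' then qscInner l (l[i]) (i + 1)
    else qscOuter l (i + 1)
  else true
termination_by l.length - i
def qscInner (l : List Char) (c : Char) (j : Nat) : Bool :=
  if h : j < l.length then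
    if l[j] = c ∧ l[j - 1]'(Nat.lt_of_le_of_lt (Nat.sub_le j 1) h) ≠ '\\' then qscOuter l (j + 1)
    else qscInner l c (j + 1)
  else false
termination_by l.length - j
end

def quotedStrClosed_py_alt (s_txt : String) : Bool :=
  qscOuter s_txt.toList 0

-- ===== PRECONDITION & SPEC =====
def Spec_quotedStrClosed_py (s_txt : String) (out : Bool) : Prop := out = quotedStrClosed_py_alt s_txt
instance (s_txt : String) (out : Bool) : Decidable (Spec_quotedStrClosed_py s_txt out) := by unfold Spec_quotedStrClosed_py; infer_instance

-- ===== CLAIM (what is proved, stated in full; the proofs are below) =====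
def Claim_equal_quotedStrClosed_py : Prop := ∀ (s_txt : String), Dom_quotedStrClosed_py s_txt → Spec_quotedStrClosed_py s_txt (quotedStrClosed_py s_txt)

-- ===== LEMMAS AND PROOFS =====

theorem qsc_key (s_txt : String) (k : Nat) : ∀ a : Int, 0 ≤ a → (PySem.Str.len s_txt - a).toNat ≤ k →
    ((((PySem.List.pyRange a (PySem.Str.len s_txt) 1).foldl (stepA s_txt) none).isNone)
        = qscOuter s_txt.toList a.toNat)
  ∧ (∀ q, (q = '\'' ∨ q = '"') → 1 ≤ a →
      (((PySem.List.pyRange a (PySem.Str.len s_txt) 1).foldl (stepA s_txt) (some q)).isNone)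
        = qscInner s_txt.toList q a.toNat) := by
  have hlen : PySem.Str.len s_txt = (s_txt.toList.length : Int) := by
    simp [PySem.Str.len]
  induction k with
  | zero =>
    intro a ha hk
    have hna : PySem.Str.len s_txt ≤ a := by omega
    have hge : ¬ (a.toNat < s_txt.toList.length) := by omega
    rw [PySem.List.pyRange_one_eq_nil hna]
    refine ⟨?_, fun q hq h1 => ?_⟩
    · rw [qscOuter, dif_neg hge]; rfl
    · rw [qscInner, dif_neg hge]; rfl
  | succ k ih =>
    intro a ha hk
    by_cases hna : PySem.Str.len s_txt ≤ a
    · have hge : ¬ (a.toNat < s_txt.toList.length) := by omega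
      rw [PySem.List.pyRange_one_eq_nil hna]
      refine ⟨?_, fun q hq h1 => ?_⟩
      · rw [qscOuter, dif_neg hge]; rfl
      · rw [qscInner, dif_neg hge]; rfl
    · have hlt : a < PySem.Str.len s_txt := lt_of_not_ge hna
      have halt : a.toNat < s_txt.toList.length := by omega
      have hget : PySem.List.pyGet? s_txt.toList a = some (s_txt.toList[a.toNat]'halt) := by
        rw [PySem.List.pyGet?_of_nonneg _ ha, List.getElem?_eq_getElem halt]
      have htn : ((a + 1 : Int)).toNat = a.toNat + 1 := by omega
      have hk' : (PySem.Str.len s_txt - (a + 1)).toNat ≤ k := by omega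
      rw [PySem.List.pyRange_one_cons hlt]
      simp only [List.foldl_cons]
      refine ⟨?_, fun q hq h1 => ?_⟩
      · rw [qscOuter, dif_pos halt]
        by_cases hc : s_txt.toList[a.toNat]'halt = '\'' ∨ s_txt.toList[a.toNat]'halt = '"'
        · simp only [stepA, PySem.Str.pyGet?_eq, PySem.Chars.pyGet?_eq_listPyGet?, hget,
            if_pos hc]
          rw [(ih (a + 1) (by omega) hk').2 _ hc (by omega), htn]
        · simp only [stepA, PySem.Str.pyGet?_eq, PySem.Chars.pyGet?_eq_listPyGet?, hget,
            if_neg hc]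
          rw [(ih (a + 1) (by omega) hk').1, htn]
      · have h0a : (0 : Int) ≤ a - 1 := by omega
        have hprevn : (a - 1).toNat = a.toNat - 1 := by omega
        have hprev : PySem.List.pyGet? s_txt.toList (a - 1)
            = some (s_txt.toList[a.toNat - 1]'(by omega)) := by
          rw [PySem.List.pyGet?_of_nonneg _ h0a, hprevn,
            List.getElem?_eq_getElem (by omega : a.toNat - 1 < s_txt.toList.length)]
        rw [qscInner, dif_pos halt]
        by_cases hm : s_txt.toList[a.toNat]'halt = q ∧ s_txt.toList[a.toNat - 1]'(by omega) ≠ '\\'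
        · -- unescaped matching close quote: A resets to none, B breaks to the outer loop
          have hcq : s_txt.toList[a.toNat]'halt = '\'' ∨ s_txt.toList[a.toNat]'halt = '"' := by
            rcases hq with h | h <;> [left; right] <;> rw [hm.1, h]
          simp only [stepA, PySem.Str.pyGet?_eq, PySem.Chars.pyGet?_eq_listPyGet?, hget,
            if_pos hcq]
          rw [if_pos ⟨by omega, by rw [hprev]; simp [hm.2]⟩, if_pos hm.1.symm]
          rw [(ih (a + 1) (by omega) hk').1, htn, if_pos hm]
        · -- no close here: A keeps the open quote, B keeps scanning
          have hstay : stepA s_txt (some q) a = some q := by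
            simp only [stepA, PySem.Str.pyGet?_eq, PySem.Chars.pyGet?_eq_listPyGet?, hget]
            by_cases hc : s_txt.toList[a.toNat]'halt = '\'' ∨ s_txt.toList[a.toNat]'halt = '"'
            · simp only [if_pos hc]
              by_cases hbs : s_txt.toList[a.toNat - 1]'(by omega) = '\\'
              · rw [if_neg]; simp [hprev, hbs]
              · rw [if_pos ⟨by omega, by rw [hprev]; simp [hbs]⟩, if_neg]
                intro hqc
                exact hm ⟨hqc.symm, hbs⟩
            · simp only [if_neg hc]
          rw [hstay, (ih (a + 1) (by omega) hk').2 _ hq (by omega), htn, if_neg hm]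

theorem quotedStrClosed_py_spec : Claim_equal_quotedStrClosed_py := by
  intro s_txt _
  unfold Spec_quotedStrClosed_py quotedStrClosed_py quotedStrClosed_py_alt
  have h := (qsc_key s_txt (PySem.Str.len s_txt - 0).toNat 0 le_rfl le_rfl).1
  simpa using h
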